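-- pv_equiv track=rewrite | github.com/ArgusQuote/ElectricalDiagramAnalyzer | DevEnv/DevEnvFindHeader.py | pick_nearest_line
-- ===== SOURCE A (Python) =====
-- def pick_nearest_line(lines, ref_y, prefer_above=None, gap_min=2, search_px=None):
--     if ref_y is None or not lines:
--         return None
--     ref_y = int(ref_y)
--     cands = lines
--     if prefer_above is True:
--         cands = [ln for ln in cands if ln["y_center"] <= ref_y - gap_min]
--     elif prefer_above is False:
--         cands = [ln for ln in cands if ln["y_center"] >= ref_y + gap_min]
--     if search_px is not None:
--         lo, hi = ref_y - search_px, ref_y + search_px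
--         cands = [ln for ln in cands if lo <= ln["y_center"] <= hi]
--     if not cands:
--         return None
--     best = min(cands, key=lambda ln: abs(ln["y_center"] - ref_y))
--     return int(best["y_center"])
-- ===== SOURCE B (Python) =====
-- def pick_nearest_line(lines, ref_y, prefer_above=None, gap_min=2, search_px=None):
--     if ref_y is None or not lines:
--         return None
--     ref_y = int(ref_y)
--     # Stable sort by distance to ref_y: the first admissible line in this order
--     # is exactly min() over the filtered candidates (ties keep original order).
--     for ln in sorted(lines, key=lambda ln: abs(ln["y_center"] - ref_y)):
--         y = ln["y_center"]
--         if prefer_above is True and not (y <= ref_y - gap_min):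
--             continue
--         if prefer_above is False and not (y >= ref_y + gap_min):
--             continue
--         if search_px is not None and not (ref_y - search_px <= y <= ref_y + search_px):
--             continue
--         return int(y)
--     return None
-- ===== Notes on version B (the rewrite author's own statement) =====
-- stated objective: alternative
-- what changed: B replaces A's staged filter comprehensions plus a min() scan by stably sorting all lines by distance to ref_y and returning the first line of that order that passes the constraints (stability makes the first admissible element equal to min's first-tie choice).
-- outside the precondition, e.g. on pick_nearest_line([{}], 5, None, 2, None): A raises KeyError, B raises KeyError
import Mathlib
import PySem

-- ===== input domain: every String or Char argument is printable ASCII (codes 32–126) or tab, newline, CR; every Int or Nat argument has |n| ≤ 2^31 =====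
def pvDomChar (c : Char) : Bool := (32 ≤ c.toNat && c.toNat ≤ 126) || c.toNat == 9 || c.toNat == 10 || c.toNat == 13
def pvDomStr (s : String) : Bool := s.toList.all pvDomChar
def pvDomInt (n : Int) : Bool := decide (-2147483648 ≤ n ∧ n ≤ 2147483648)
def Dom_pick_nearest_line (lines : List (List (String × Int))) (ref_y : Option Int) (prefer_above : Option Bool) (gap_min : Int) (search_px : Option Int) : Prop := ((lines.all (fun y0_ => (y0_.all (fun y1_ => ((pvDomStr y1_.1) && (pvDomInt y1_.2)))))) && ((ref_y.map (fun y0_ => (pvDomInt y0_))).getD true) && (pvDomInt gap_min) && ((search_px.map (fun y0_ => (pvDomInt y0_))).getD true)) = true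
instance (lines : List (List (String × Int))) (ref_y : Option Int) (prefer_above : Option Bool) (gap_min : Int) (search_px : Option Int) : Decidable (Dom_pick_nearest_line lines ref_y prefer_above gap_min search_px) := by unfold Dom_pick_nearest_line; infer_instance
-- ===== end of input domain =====

-- B replaces A's staged filters + min() by a stable sort of all lines by distance to ref_y
-- followed by returning the first line of that order passing the constraints (alternative decomposition).

-- ===== PORT A =====
-- ln["y_center"]: first match in the association list; total form under Pre_ (key present), default 0 never used inside Pre_.
def pvGetY (ln : List (String × Int)) : Int :=
  ((ln.find? (fun kv => kv.1 == "y_center")).map (fun kv => kv.2)).getD 0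

def pick_nearest_line (lines : List (List (String × Int))) (ref_y : Option Int) (prefer_above : Option Bool) (gap_min : Int) (search_px : Option Int) : Option Int :=
  match ref_y with
  | none => none
  | some r =>
    if lines.isEmpty then none else
    let cands := lines
    let cands :=
      match prefer_above with
      | some true  => cands.filter (fun ln => decide (pvGetY ln ≤ r - gap_min))
      | some false => cands.filter (fun ln => decide (r + gap_min ≤ pvGetY ln))
      | none => cands
    let cands :=
      match search_px with
      | some s => cands.filter (fun ln => decide (r - s ≤ pvGetY ln ∧ pvGetY ln ≤ r + s))
      | none => cands
    if cands.isEmpty then none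
    else (PySem.List.min? cands (fun ln => |pvGetY ln - r|)).map pvGetY

-- ===== PORT B =====
-- the three sequential skip-tests of Source B's loop body, as one boolean (pa test, then window test)
def pvOkB (r gap_min : Int) (pa : Option Bool) (sp : Option Int) (y : Int) : Bool :=
  (match pa with
   | some true  => decide (y ≤ r - gap_min)
   | some false => decide (r + gap_min ≤ y)
   | none => true)
  && (match sp with
      | some s => decide (r - s ≤ y ∧ y ≤ r + s)
      | none => true)

def pick_nearest_line_alt (lines : List (List (String × Int))) (ref_y : Option Int) (prefer_above : Option Bool) (gap_min : Int) (search_px : Option Int) : Option Int :=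
  match ref_y with
  | none => none
  | some r =>
    if lines.isEmpty then none else
    -- Source B: for ln in sorted(lines, key=…): if the tests pass, return int(y); else None
    ((PySem.List.sorted lines (fun ln => |pvGetY ln - r|)).find?
        (fun ln => pvOkB r gap_min prefer_above search_px (pvGetY ln))).map pvGetY

-- ===== PRECONDITION & SPEC =====
-- Pre_ excludes exactly the inputs where A (and B alike) raises KeyError: some line lacks the "y_center" key while it is consulted.
def Pre_pick_nearest_line (lines : List (List (String × Int))) (ref_y : Option Int) (prefer_above : Option Bool) (gap_min : Int) (search_px : Option Int) : Prop :=
  ref_y = none ∨ ∀ ln ∈ lines, (ln.any (fun kv => kv.1 == "y_center")) = true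
instance (lines : List (List (String × Int))) (ref_y : Option Int) (prefer_above : Option Bool) (gap_min : Int) (search_px : Option Int) : Decidable (Pre_pick_nearest_line lines ref_y prefer_above gap_min search_px) := by unfold Pre_pick_nearest_line; infer_instance

def pvWitness_pick_nearest_line : (List (List (String × Int))) × Option Int × Option Bool × Int × Option Int :=
  ([[("y_center", 10)], [("y_center", 25)]], some 20, some true, 2, some 30)

def Spec_pick_nearest_line (lines : List (List (String × Int))) (ref_y : Option Int) (prefer_above : Option Bool) (gap_min : Int) (search_px : Option Int) (out : Option Int) : Prop := out = pick_nearest_line_alt lines ref_y prefer_above gap_min search_px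
instance (lines : List (List (String × Int))) (ref_y : Option Int) (prefer_above : Option Bool) (gap_min : Int) (search_px : Option Int) (out : Option Int) : Decidable (Spec_pick_nearest_line lines ref_y prefer_above gap_min search_px out) := by unfold Spec_pick_nearest_line; infer_instance

-- ===== CLAIM (what is proved, stated in full; the proofs are below) =====
def Claim_equal_pick_nearest_line : Prop := ∀ (lines : List (List (String × Int))) (ref_y : Option Int) (prefer_above : Option Bool) (gap_min : Int) (search_px : Option Int), Dom_pick_nearest_line lines ref_y prefer_above gap_min search_px → Pre_pick_nearest_line lines ref_y prefer_above gap_min search_px → Spec_pick_nearest_line lines ref_y prefer_above gap_min search_px (pick_nearest_line lines ref_y prefer_above gap_min search_px)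

-- ===== LEMMAS AND PROOFS =====

-- the first-strict-min step of PySem.List.min?, guarded by the predicate p
def pvStep {α : Type} (k : α → Int) (p : α → Bool) (acc : Option α) (x : α) : Option α :=
  if p x then
    match acc with
    | none => some x
    | some m => if k x < k m then some x else some m
  else acc

-- inserting x into a key-sorted list commutes find? with one pvStep
theorem pv_find_insertBy {α : Type} (k : α → Int) (p : α → Bool) (x : α) :
    ∀ (l : List α), l.Pairwise (fun a b => k a ≤ k b) →
      (PySem.List.insertBy (fun a b => decide (k a < k b)) x l).find? p
        = pvStep k p (l.find? p) x := by
  intro l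
  induction l with
  | nil =>
    intro _
    simp only [PySem.List.insertBy, List.find?, pvStep]
    by_cases hp : p x <;> simp [hp]
  | cons y ys ih =>
    intro hpw
    have hpw' := (List.pairwise_cons.mp hpw).2
    have hyle := (List.pairwise_cons.mp hpw).1
    simp only [PySem.List.insertBy]
    by_cases hlt : k x < k y
    · simp only [decide_eq_true_eq, hlt, if_true]
      by_cases hp : p x
      · rw [List.find?_cons_of_pos hp]
        simp only [pvStep, hp, if_true]
        cases hfy : List.find? p (y :: ys) with
        | none => rfl
        | some m =>
          have hm : m ∈ y :: ys := List.mem_of_find?_eq_some hfy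
          have hxm : k x < k m := by
            rcases List.mem_cons.mp hm with h | h
            · exact h ▸ hlt
            · exact lt_of_lt_of_le hlt (hyle m h)
          simp [hxm]
      · rw [List.find?_cons_of_neg (by simp [hp])]
        simp [pvStep, hp]
    · simp only [decide_eq_true_eq, hlt, if_false]
      by_cases hpy : p y
      · simp only [List.find?, hpy, pvStep]
        by_cases hp : p x <;> simp [hp, hlt]
      · simp only [List.find?, hpy]
        simpa [hpy] using ih hpw'
  
-- B's sorted-then-first-hit equals the predicate-guarded first-min fold over the original list
theorem pv_sorted_find_eq_fold {α : Type} (k : α → Int) (p : α → Bool) (xs : List α) :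
    (PySem.List.sorted xs k).find? p = xs.foldl (pvStep k p) none := by
  induction xs using List.reverseRecOn with
  | nil => rfl
  | append_singleton ys x ih =>
    have hsorted : PySem.List.sorted (ys ++ [x]) k
        = PySem.List.insertBy (fun a b => decide (k a < k b)) x (PySem.List.sorted ys k) := by
      simp [PySem.List.sorted, List.foldl_append]
    rw [hsorted, pv_find_insertBy k p x _ (PySem.List.sorted_pairwise ys k), ih,
        List.foldl_append]
    rfl

-- the guarded first-min fold over xs is min? over the filtered list
theorem pv_fold_eq_min_filter {α : Type} (k : α → Int) (p : α → Bool) (xs : List α) :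
    xs.foldl (pvStep k p) none = PySem.List.min? (xs.filter p) k := by
  simp only [PySem.List.min?, List.foldl_filter]
  congr 1

-- A's result, with the redundant empty-candidates guard removed
theorem pv_A_eq_min (lines : List (List (String × Int))) (r gap_min : Int)
    (prefer_above : Option Bool) (search_px : Option Int) (h : lines.isEmpty = false)
    (cands : List (List (String × Int)))
    (hc : cands =
      (match search_px with
       | some s => List.filter (fun ln => decide (r - s ≤ pvGetY ln ∧ pvGetY ln ≤ r + s))
       | none => id)
      ((match prefer_above with
        | some true  => List.filter (fun ln => decide (pvGetY ln ≤ r - gap_min))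
        | some false => List.filter (fun ln => decide (r + gap_min ≤ pvGetY ln))
        | none => id) lines)) :
    pick_nearest_line lines (some r) prefer_above gap_min search_px
      = (PySem.List.min? cands (fun ln => |pvGetY ln - r|)).map pvGetY := by
  have hform : pick_nearest_line lines (some r) prefer_above gap_min search_px
      = if cands.isEmpty then none
        else (PySem.List.min? cands (fun ln => |pvGetY ln - r|)).map pvGetY := by
    simp only [pick_nearest_line, h, Bool.false_eq_true, if_false, hc]
    cases prefer_above with
    | none => cases search_px <;> rfl
    | some b => cases b <;> cases search_px <;> rfl
  rw [hform]
  by_cases he : cands.isEmpty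
  · rw [List.isEmpty_iff] at he
    subst he; simp [PySem.List.min?]
  · simp [he]

theorem pick_nearest_line_spec_aux (lines : List (List (String × Int))) (ref_y : Option Int)
    (prefer_above : Option Bool) (gap_min : Int) (search_px : Option Int) :
    pick_nearest_line lines ref_y prefer_above gap_min search_px
      = pick_nearest_line_alt lines ref_y prefer_above gap_min search_px := by
  cases ref_y with
  | none => rfl
  | some r =>
    by_cases h : lines.isEmpty
    · simp [pick_nearest_line, pick_nearest_line_alt, h]
    · rw [Bool.not_eq_true] at h
      rw [pv_A_eq_min lines r gap_min prefer_above search_px h _ rfl]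
      have hfilter :
          (match search_px with
           | some s => List.filter (fun ln => decide (r - s ≤ pvGetY ln ∧ pvGetY ln ≤ r + s))
           | none => id)
          ((match prefer_above with
            | some true  => List.filter (fun ln => decide (pvGetY ln ≤ r - gap_min))
            | some false => List.filter (fun ln => decide (r + gap_min ≤ pvGetY ln))
            | none => id) lines)
          = lines.filter (fun ln => pvOkB r gap_min prefer_above search_px (pvGetY ln)) := by
        cases prefer_above with
        | none =>
          cases search_px with
          | none => simp [pvOkB]
          | some s => simp only [id]; apply List.filter_congr; intro a _; simp [pvOkB]
        | some b =>
          cases b <;> cases search_px <;>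
            first
            | (simp only [id]; apply List.filter_congr; intro a _; simp [pvOkB])
            | (simp only [List.filter_filter]; apply List.filter_congr; intro a _;
               simp [pvOkB, Bool.and_comm])
      rw [hfilter]
      have halt : pick_nearest_line_alt lines (some r) prefer_above gap_min search_px
          = ((PySem.List.sorted lines (fun ln => |pvGetY ln - r|)).find?
              (fun ln => pvOkB r gap_min prefer_above search_px (pvGetY ln))).map pvGetY := by
        simp [pick_nearest_line_alt, h]
      rw [halt,
          pv_sorted_find_eq_fold (fun ln => |pvGetY ln - r|)
            (fun ln => pvOkB r gap_min prefer_above search_px (pvGetY ln)) lines,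
          pv_fold_eq_min_filter]

-- ===== VERDICT (by name: the statement is the Claim_ definition above) =====
theorem pick_nearest_line_spec : Claim_equal_pick_nearest_line := by
  intro lines ref_y prefer_above gap_min search_px _ _
  exact pick_nearest_line_spec_aux lines ref_y prefer_above gap_min search_px
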